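-- pv_equiv track=rewrite | github.com/ryandalton1/Algorithms | Dynamic Programming 2/main.py | commonSubstrings
-- ===== SOURCE A (Python) =====
-- def commonSubstrings(x, L, a):
--     #for each run of "no-ops" that are at least length L return that string
--     stringCounter = 0
--     blank = ""
--     solution = []
--     for i in range(len(x)):
--         if(a[i] == "No-Op"):
--             blank = blank + x[stringCounter]
--             stringCounter += 1
--         else:
--             if(len(blank) >= L):
--                 solution.append(blank)
--             blank = ""
--             stringCounter += 1
--     if(len(blank) >= L):
--         solution.append(blank)
--     return solution
-- ===== SOURCE B (Python) =====
-- def commonSubstrings(x, L, a):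
--     # Split x at the positions where a[i] is not "No-Op", then keep pieces of length >= L.
--     pieces = []
--     start = 0
--     for i in range(len(x)):
--         if a[i] != "No-Op":
--             pieces.append(x[start:i])
--             start = i + 1
--     pieces.append(x[start:])
--     return [p for p in pieces if len(p) >= L]
-- ===== Notes on version B (the rewrite author's own statement) =====
-- stated objective: simpler
-- what changed: Instead of accumulating the run character by character with a separate counter and filtering inline, B splits x at the non-No-Op positions into slices in one pass and then keeps the pieces of length >= L with a comprehension.
import Mathlib
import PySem

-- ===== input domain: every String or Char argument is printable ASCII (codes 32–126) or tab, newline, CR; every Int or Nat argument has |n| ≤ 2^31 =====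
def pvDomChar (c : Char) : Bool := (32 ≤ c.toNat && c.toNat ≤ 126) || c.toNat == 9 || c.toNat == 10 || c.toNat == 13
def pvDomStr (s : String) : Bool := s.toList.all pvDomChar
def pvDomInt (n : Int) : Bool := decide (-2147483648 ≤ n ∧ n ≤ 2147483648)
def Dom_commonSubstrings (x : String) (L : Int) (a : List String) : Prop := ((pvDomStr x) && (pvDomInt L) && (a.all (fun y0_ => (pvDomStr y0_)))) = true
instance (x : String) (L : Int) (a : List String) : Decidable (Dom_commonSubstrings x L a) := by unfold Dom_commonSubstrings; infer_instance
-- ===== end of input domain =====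

-- B replaces A's character-by-character accumulation with a split-at-delimiters pass
-- followed by a length filter (objective: simpler decomposition, same cost).

-- ===== PORT A =====
-- loop body of A: state = (stringCounter, blank, solution); blank carried as List Char
-- (blank + x[stringCounter]: stringCounter always equals i < len(x), so x[stringCounter]
-- never raises; pyGet?.toList appends exactly that character).
def aStep (xs : List Char) (L : Int) (a : List String) (st : Int × List Char × List String) (i : Int) : Int × List Char × List String :=
  if PySem.List.pyGetD a i "" == "No-Op" then
    (st.1 + 1, st.2.1 ++ (PySem.List.pyGet? xs st.1).toList, st.2.2)
  else
    (st.1 + 1, [], if L ≤ (st.2.1.length : Int) then st.2.2 ++ [String.ofList st.2.1] else st.2.2)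

-- the final 'if len(blank) >= L: solution.append(blank)'
def aFinish (L : Int) (st : Int × List Char × List String) : List String :=
  if L ≤ (st.2.1.length : Int) then st.2.2 ++ [String.ofList st.2.1] else st.2.2

-- a[i] raises IndexError when len(a) < len(x); Pre_ excludes exactly those inputs.
def commonSubstrings (x : String) (L : Int) (a : List String) : List String :=
  let xs := x.toList
  aFinish L ((PySem.List.pyRange 0 (xs.length : Int) 1).foldl (aStep xs L a) (0, [], []))

-- ===== PORT B =====
-- loop body of B: state = (pieces, start); appends the slice x[start:i] at each delimiter
def bStep (xs : List Char) (a : List String) (st : List String × Int) (i : Int) : List String × Int :=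
  if PySem.List.pyGetD a i "" == "No-Op" then st
  else (st.1 ++ [String.ofList (PySem.List.slice xs (some st.2) (some i))], i + 1)

-- 'pieces.append(x[start:])' then the filter comprehension
def bFinish (xs : List Char) (L : Int) (st : List String × Int) : List String :=
  (st.1 ++ [String.ofList (PySem.List.slice xs (some st.2) none)]).filter
    (fun p => decide (L ≤ (p.toList.length : Int)))

def commonSubstrings_alt (x : String) (L : Int) (a : List String) : List String :=
  let xs := x.toList
  bFinish xs L ((PySem.List.pyRange 0 (xs.length : Int) 1).foldl (bStep xs a) ([], 0))

-- ===== PRECONDITION & SPEC =====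
-- Pre_ excludes exactly the inputs where A raises IndexError: a[i] with len(a) < len(x).
def Pre_commonSubstrings (x : String) (L : Int) (a : List String) : Prop :=
  x.toList.length ≤ a.length
instance (x : String) (L : Int) (a : List String) : Decidable (Pre_commonSubstrings x L a) := by unfold Pre_commonSubstrings; infer_instance

def pvWitness_commonSubstrings : String × Int × List String :=
  ("abba", 2, ["No-Op", "No-Op", "Add", "No-Op"])

def Spec_commonSubstrings (x : String) (L : Int) (a : List String) (out : List String) : Prop := out = commonSubstrings_alt x L a
instance (x : String) (L : Int) (a : List String) (out : List String) : Decidable (Spec_commonSubstrings x L a out) := by unfold Spec_commonSubstrings; infer_instance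

-- ===== CLAIM (what is proved, stated in full; the proofs are below) =====
def Claim_equal_commonSubstrings : Prop := ∀ (x : String) (L : Int) (a : List String), Dom_commonSubstrings x L a → Pre_commonSubstrings x L a → Spec_commonSubstrings x L a (commonSubstrings x L a)

-- ===== LEMMAS AND PROOFS =====

-- filtering one piece is A's inline length test
lemma filt_single (L : Int) (blank : List Char) :
    List.filter (fun p => decide (L ≤ (p.toList.length : Int))) [String.ofList blank]
      = if L ≤ (blank.length : Int) then [String.ofList blank] else [] := by
  by_cases h : L ≤ (blank.length : Int) <;> simp [h]

-- Loop invariant: A's (stringCounter, blank, solution) at index i are (i, x[start:i],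
-- filtered pieces) for B's (pieces, start); both tails then produce the same result.
lemma loop_eq (xs : List Char) (L : Int) (a : List String) :
    ∀ (k i start : Nat) (blank : List Char) (sol pieces : List String),
      i + k = xs.length → start ≤ i →
      blank = (xs.drop start).take (i - start) →
      sol = pieces.filter (fun p => decide (L ≤ (p.toList.length : Int))) →
      aFinish L ((PySem.List.pyRange (i : Int) (xs.length : Int) 1).foldl (aStep xs L a) ((i : Int), blank, sol))
        = bFinish xs L ((PySem.List.pyRange (i : Int) (xs.length : Int) 1).foldl (bStep xs a) (pieces, (start : Int))) := by
  intro k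
  induction k with
  | zero =>
    intro i start blank sol pieces hk hsi hb hs
    have hin : (i : Int) ≥ (xs.length : Int) := by omega
    rw [PySem.List.pyRange_one_eq_nil (by omega)]
    simp only [List.foldl_nil]
    subst hb hs
    have hdrop : (xs.drop start).take (i - start) = xs.drop start := by
      apply List.take_of_length_le; simp; omega
    rw [hdrop]
    unfold aFinish bFinish
    rw [PySem.List.slice_from_natCast, List.filter_append, filt_single]
    split_ifs <;> simp
  | succ k ih =>
    intro i start blank sol pieces hk hsi hb hs
    have hilt : (i : Int) < (xs.length : Int) := by omega
    rw [PySem.List.pyRange_one_cons hilt]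
    simp only [List.foldl_cons]
    by_cases hc : PySem.List.pyGetD a (i : Int) "" == "No-Op"
    · -- No-Op: A extends blank with xs[i]; B leaves its state unchanged
      have hstepA : aStep xs L a ((i : Int), blank, sol) (i : Int)
          = ((i : Int) + 1, blank ++ (PySem.List.pyGet? xs (i : Int)).toList, sol) := by
        unfold aStep; rw [if_pos hc]
      have hstepB : bStep xs a (pieces, (start : Int)) (i : Int) = (pieces, (start : Int)) := by
        unfold bStep; rw [if_pos hc]
      rw [hstepA, hstepB]
      have hint : ((i : Int) + 1) = ((i + 1 : Nat) : Int) := by push_cast; ring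
      have hget : (PySem.List.pyGet? xs (i : Int)).toList = [xs[i]'(by omega)] := by
        have : PySem.List.pyGet? xs (i : Int) = xs[i]? := PySem.List.pyGet?_natCast xs i
        rw [this, List.getElem?_eq_getElem (by omega)]
        rfl
      have hb' : blank ++ (PySem.List.pyGet? xs (i : Int)).toList
          = (xs.drop start).take (i + 1 - start) := by
        rw [hget, hb]
        have h1 : i - start < (xs.drop start).length := by simp; omega
        have h2 : (xs.drop start)[i - start]'h1 = xs[i]'(by omega) := by
          rw [List.getElem_drop]; congr 1; omega
        have h3 : i + 1 - start = (i - start) + 1 := by omega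
        rw [h3, ← List.take_concat_get h1, List.concat_eq_append, h2]
      rw [hint, hb']
      exact ih (i + 1) start _ sol pieces (by omega) (by omega) rfl hs
    · -- delimiter: A flushes blank into solution; B records the slice x[start:i]
      have hstepA : aStep xs L a ((i : Int), blank, sol) (i : Int)
          = ((i : Int) + 1, [], if L ≤ (blank.length : Int) then sol ++ [String.ofList blank] else sol) := by
        unfold aStep; rw [if_neg hc]
      have hstepB : bStep xs a (pieces, (start : Int)) (i : Int)
          = (pieces ++ [String.ofList (PySem.List.slice xs (some (start : Int)) (some (i : Int)))], (i : Int) + 1) := by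
        unfold bStep; rw [if_neg hc]
      rw [hstepA, hstepB]
      have hint : ((i : Int) + 1) = ((i + 1 : Nat) : Int) := by push_cast; ring
      have hslice : PySem.List.slice xs (some (start : Int)) (some (i : Int))
          = (xs.drop start).take (i - start) := PySem.List.slice_natCast xs start i
      have hsol : (if L ≤ (blank.length : Int) then sol ++ [String.ofList blank] else sol)
          = (pieces ++ [String.ofList (PySem.List.slice xs (some (start : Int)) (some (i : Int)))]).filter
              (fun p => decide (L ≤ (p.toList.length : Int))) := by
        rw [hslice, ← hb, List.filter_append, filt_single, ← hs]
        split_ifs <;> simp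
      rw [hint, hsol]
      exact ih (i + 1) (i + 1) [] _ _ (by omega) (le_refl _) (by simp) rfl

-- ===== VERDICT (by name: the statement is the Claim_ definition above) =====
theorem commonSubstrings_spec : Claim_equal_commonSubstrings := by
  intro x L a _ _
  unfold Spec_commonSubstrings commonSubstrings commonSubstrings_alt
  have h := loop_eq x.toList L a x.toList.length 0 0 [] [] [] (by omega) (le_refl _) (by simp) rfl
  simpa using h
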